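-- pv_equiv track=rewrite | github.com/rahulgorle/GFG-POTD | Number of paths in a matrix with k coins.py | numberOfPath
-- ===== SOURCE A (Python) =====
-- def numberOfPath(n, k, arr):
--     def count_paths(i, j, n, k, arr, dp):
--         # If we reached the bottom-right cell and the sum matches k, return 1 (one valid path found)
--         if i == n - 1 and j == n - 1 and k == arr[i][j]:
--             return 1
--         # If out of bounds or the remaining sum is negative, return 0 (no valid path)
--         if i >= n or j >= n or k < 0:
--             return 0
--         # If the result for the current cell and sum is already computed, return it
--         if dp[i][j][k] != -1:
--             return dp[i][j][k]
--         # Explore downward and rightward paths, updating the DP table with the sum counts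
--         down = count_paths(i + 1, j, n, k - arr[i][j], arr, dp)
--         right = count_paths(i, j + 1, n, k - arr[i][j], arr, dp)
--         # Update DP table with the count of paths reaching the current cell with the current sum
--         dp[i][j][k] = down + right
--         return dp[i][j][k]
--
--     # Initialize DP table with -1 values
--     dp = [[[-1 for _ in range(k + 1)] for _ in range(n)] for _ in range(n)]
--     # Start the recursive function from the top-left cell
--     return count_paths(0, 0, n, k, arr, dp)
-- ===== SOURCE B (Python) =====
-- def numberOfPath(n, k, arr):
--     # Bottom-up DP: for each cell keep a dict {path-sum-to-corner: count}; answer = count for sum k at (0,0).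
--     if n <= 0 or k < 0:
--         return 0
--     below = []
--     for i in range(n - 1, -1, -1):
--         row = []
--         for j in range(n - 1, -1, -1):
--             a = arr[i][j]
--             if i == n - 1 and j == n - 1:
--                 d = {a: 1}
--             else:
--                 d = {}
--                 if i + 1 < n:
--                     for s, c in below[j].items():
--                         d[s + a] = d.get(s + a, 0) + c
--                 if j + 1 < n:
--                     for s, c in row[0].items():
--                         d[s + a] = d.get(s + a, 0) + c
--             row.insert(0, d)
--         below = row
--     return below[0].get(k, 0)
-- ===== Notes on version B (the rewrite author's own statement) =====
-- stated objective: alternative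
-- what changed: Replaces A's top-down memoized recursion over a dense n*n*(k+1) table with an iterative bottom-up sweep that keeps, per cell, a dictionary mapping each reachable path-sum-to-corner to its path count (with a trivial n<=0 / k<0 short-circuit) and finally looks up k.
-- outside the precondition, e.g. on numberOfPath(2, 1, [[2, 2], [2, -3]]): A returns 0, B returns 2; on numberOfPath(1, -5, [[-5]]): A returns 1, B returns 0; on numberOfPath(4, 2, [[4, 3], [-1, 1, 1], [1, 3, -3]]): A returns 0, B raises IndexError
import Mathlib
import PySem

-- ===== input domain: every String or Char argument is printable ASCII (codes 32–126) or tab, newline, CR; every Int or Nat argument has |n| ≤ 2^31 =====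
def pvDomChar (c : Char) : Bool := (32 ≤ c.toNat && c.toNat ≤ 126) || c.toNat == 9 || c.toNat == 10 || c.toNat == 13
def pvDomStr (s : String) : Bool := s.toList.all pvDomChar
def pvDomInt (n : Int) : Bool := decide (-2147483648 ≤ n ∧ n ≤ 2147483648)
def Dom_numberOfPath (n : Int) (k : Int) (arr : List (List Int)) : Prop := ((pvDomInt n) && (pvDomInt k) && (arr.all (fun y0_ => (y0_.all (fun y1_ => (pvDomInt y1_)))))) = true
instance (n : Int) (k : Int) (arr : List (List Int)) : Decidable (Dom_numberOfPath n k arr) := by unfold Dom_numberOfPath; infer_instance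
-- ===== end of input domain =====

-- B replaces A's top-down memoized recursion by an iterative bottom-up sweep keeping, per cell, a
-- dictionary from reachable path-sum-to-corner to path count (an alternative decomposition, no speed claim).

-- ===== PORT A =====
-- arr[i][j] (indices are always ≥ 0 and in range on admitted inputs, so getD is exact)
def pvGetA (arr : List (List Int)) (i j : Int) : Int := (arr.getD i.toNat []).getD j.toNat 0
-- dp[i][j][k] read (in range on admitted inputs)
def pvRead3 (dp : List (List (List Int))) (i j k : Int) : Int :=
  ((dp.getD i.toNat []).getD j.toNat []).getD k.toNat (-1)
-- dp[i][j][k] = v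
def pvSet3 (dp : List (List (List Int))) (i j k v : Int) : List (List (List Int)) :=
  dp.modify i.toNat (fun r => r.modify j.toNat (fun c => c.set k.toNat v))

def pvCountPaths (n : Int) (arr : List (List Int)) (i j k : Int) (dp : List (List (List Int))) :
    Int × List (List (List Int)) :=
  if i = n - 1 ∧ j = n - 1 ∧ k = pvGetA arr i j then (1, dp)
  else if h : n ≤ i ∨ n ≤ j ∨ k < 0 then (0, dp)
  else if pvRead3 dp i j k ≠ -1 then (pvRead3 dp i j k, dp)
  else
    let r1 := pvCountPaths n arr (i + 1) j (k - pvGetA arr i j) dp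
    let r2 := pvCountPaths n arr i (j + 1) (k - pvGetA arr i j) r1.2
    (r1.1 + r2.1, pvSet3 r2.2 i j k (r1.1 + r2.1))
termination_by (2 * n - i - j).toNat
decreasing_by all_goals omega

def numberOfPath (n : Int) (k : Int) (arr : List (List Int)) : Int :=
  let dp := List.replicate n.toNat (List.replicate n.toNat (List.replicate (k + 1).toNat (-1 : Int)))
  (pvCountPaths n arr 0 0 k dp).1

-- ===== PORT B =====
-- for s, c in src.items(): d[s + a] = d.get(s + a, 0) + c
def pvAddShift (a : Int) (d src : PySem.Dict Int Int) : PySem.Dict Int Int :=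
  src.items.foldl (fun d p => d.insert (p.1 + a) (d.getD (p.1 + a) 0 + p.2)) d

-- the dict B builds for cell (i, j); `row` holds the dicts for (i, j+1)..(i, n-1), `below` those of row i+1
def pvCell (n : Int) (arr : List (List Int)) (below row : List (PySem.Dict Int Int)) (i j : Int) :
    PySem.Dict Int Int :=
  let a := (arr.getD i.toNat []).getD j.toNat 0
  if i = n - 1 ∧ j = n - 1 then PySem.Dict.empty.insert a 1
  else
    let d : PySem.Dict Int Int := PySem.Dict.empty
    let d := if i + 1 < n then pvAddShift a d (below.getD j.toNat PySem.Dict.empty) else d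
    if j + 1 < n then pvAddShift a d (row.getD 0 PySem.Dict.empty) else d

def numberOfPath_alt (n : Int) (k : Int) (arr : List (List Int)) : Int :=
  if n ≤ 0 ∨ k < 0 then 0
  else
    let below := (PySem.List.pyRange (n - 1) (-1) (-1)).foldl
      (fun below i => (PySem.List.pyRange (n - 1) (-1) (-1)).foldl
        (fun row j => pvCell n arr below row i j :: row) []) []
    (below.getD 0 PySem.Dict.empty).getD k 0

-- ===== PRECONDITION & SPEC =====
-- Pre_ admits every n ≤ 0 and every k < 0 with n ≠ 1 (A short-circuits to 0 there) and, for n > 0,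
-- the natural domain: a genuine n×n matrix of NONNEGATIVE coin values. The rest is excluded because
-- A usually raises IndexError there (matrix smaller than n×n, or a negative coin pushing the memo index
-- above k); where A does return on such inputs (see cites) it is only because its negative-remaining-sum
-- pruning stops before the malformed or negative cells are reached, so its value ignores paths whose
-- negative coins bring the sum back up to k, and its n==1 corner check can match a negative coin against
-- a negative k — unspecified negative-coin / ragged-matrix corners B's full sweep does not reproduce.
def Pre_numberOfPath (n : Int) (k : Int) (arr : List (List Int)) : Prop :=
  n ≤ 0 ∨ (0 < n ∧ k < 0 ∧ n ≠ 1) ∨ (0 < n ∧ n.toNat ≤ arr.length ∧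
    ∀ i : Nat, i < n.toNat → n.toNat ≤ (arr.getD i []).length ∧
      ∀ j : Nat, j < n.toNat → 0 ≤ (arr.getD i []).getD j 0)
instance (n : Int) (k : Int) (arr : List (List Int)) : Decidable (Pre_numberOfPath n k arr) := by
  unfold Pre_numberOfPath; infer_instance

def pvWitness_numberOfPath : Int × Int × List (List Int) := (2, 4, [[1, 2], [0, 3]])

def Spec_numberOfPath (n : Int) (k : Int) (arr : List (List Int)) (out : Int) : Prop := out = numberOfPath_alt n k arr
instance (n : Int) (k : Int) (arr : List (List Int)) (out : Int) : Decidable (Spec_numberOfPath n k arr out) := by unfold Spec_numberOfPath; infer_instance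

-- ===== CLAIM (what is proved, stated in full; the proofs are below) =====
def Claim_equal_numberOfPath : Prop := ∀ (n : Int) (k : Int) (arr : List (List Int)), Dom_numberOfPath n k arr → Pre_numberOfPath n k arr → Spec_numberOfPath n k arr (numberOfPath n k arr)

-- ===== LEMMAS AND PROOFS =====

-- the common mathematical reference point: the pure (memo-free) count A's recursion implements
def pvCnt (n : Int) (arr : List (List Int)) (i j k : Int) : Int :=
  if i = n - 1 ∧ j = n - 1 ∧ k = pvGetA arr i j then 1
  else if h : n ≤ i ∨ n ≤ j ∨ k < 0 then 0
  else pvCnt n arr (i + 1) j (k - pvGetA arr i j) + pvCnt n arr i (j + 1) (k - pvGetA arr i j)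
termination_by (2 * n - i - j).toNat
decreasing_by all_goals omega

def pvCoins (n : Int) (arr : List (List Int)) : Prop :=
  ∀ i j : Int, 0 ≤ i → i < n → 0 ≤ j → j < n → 0 ≤ pvGetA arr i j

lemma pvCnt_oob (n : Int) (arr : List (List Int)) (i j k : Int) (h : n ≤ i ∨ n ≤ j) :
    pvCnt n arr i j k = 0 := by
  rw [pvCnt, if_neg (by rintro ⟨h1, h2, _⟩; omega), dif_pos (by tauto)]

lemma pvCnt_neg (n : Int) (arr : List (List Int)) (hc : 0 ≤ pvGetA arr (n - 1) (n - 1))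
    (i j t : Int) (ht : t < 0) : pvCnt n arr i j t = 0 := by
  rw [pvCnt, if_neg (by rintro ⟨h1, h2, hk⟩; subst h1; subst h2; omega), dif_pos (by omega)]

lemma pvCnt_corner (n : Int) (arr : List (List Int)) (hn : 1 ≤ n) (t : Int) :
    pvCnt n arr (n - 1) (n - 1) t = if t = pvGetA arr (n - 1) (n - 1) then 1 else 0 := by
  by_cases ht : t = pvGetA arr (n - 1) (n - 1)
  · rw [if_pos ht, pvCnt, if_pos ⟨rfl, rfl, ht⟩]
  · rw [if_neg ht, pvCnt, if_neg (by tauto)]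
    by_cases ht0 : t < 0
    · rw [dif_pos (by tauto)]
    · rw [dif_neg (by omega)]
      rw [pvCnt_oob n arr _ _ _ (by omega), pvCnt_oob n arr _ _ _ (by omega)]
      norm_num

lemma pvCnt_step (n : Int) (arr : List (List Int)) (i j t : Int)
    (hin : i < n) (hjn : j < n) (hcorner : ¬(i = n - 1 ∧ j = n - 1)) (ht : 0 ≤ t) :
    pvCnt n arr i j t
      = pvCnt n arr (i + 1) j (t - pvGetA arr i j) + pvCnt n arr i (j + 1) (t - pvGetA arr i j) := by
  rw [pvCnt, if_neg (by tauto), dif_neg (by omega)]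

-- ===== A side: the memo table =====
def pvShapeDp (n k0 : Int) (dp : List (List (List Int))) : Prop :=
  dp.length = n.toNat ∧
  (∀ i' : Nat, (dp.getD i' []).length = if i' < n.toNat then n.toNat else 0) ∧
  (∀ i' j' : Nat, ((dp.getD i' []).getD j' []).length = if i' < n.toNat ∧ j' < n.toNat then (k0 + 1).toNat else 0)

def pvInvDp (n k0 : Int) (arr : List (List Int)) (dp : List (List (List Int))) : Prop :=
  ∀ i j k : Int, 0 ≤ i → i < n → 0 ≤ j → j < n → 0 ≤ k → k ≤ k0 →
    pvRead3 dp i j k = -1 ∨ pvRead3 dp i j k = pvCnt n arr i j k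

lemma pvRead3_set3_self (dp : List (List (List Int))) (i j k v : Int)
    (hi : i.toNat < dp.length) (hj : j.toNat < (dp.getD i.toNat []).length)
    (hk : k.toNat < ((dp.getD i.toNat []).getD j.toNat []).length) :
    pvRead3 (pvSet3 dp i j k v) i j k = v := by
  simp [pvRead3, pvSet3, List.getD_eq_getElem?_getD, List.getElem?_modify] at *
  cases h1 : dp[i.toNat]? with
  | none => simp at h1; omega
  | some r =>
    simp [h1] at hj ⊢
    cases h2 : r[j.toNat]? with
    | none => simp at h2; simp [h1] at hj hk; omega
    | some c =>
      simp [h1, h2] at hk ⊢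
      simp [hk]

lemma pvRead3_set3_ne (dp : List (List (List Int))) (i j k v i' j' k' : Int)
    (h : ¬(i.toNat = i'.toNat ∧ j.toNat = j'.toNat ∧ k.toNat = k'.toNat)) :
    pvRead3 (pvSet3 dp i j k v) i' j' k' = pvRead3 dp i' j' k' := by
  simp only [pvRead3, pvSet3, List.getD_eq_getElem?_getD, List.getElem?_modify]
  cases h1 : dp[i'.toNat]? with
  | none => simp
  | some r =>
    simp only [Option.map_some, Option.getD_some]
    by_cases hii : i.toNat = i'.toNat
    · simp [hii, List.getElem?_modify]
      cases h2 : r[j'.toNat]? with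
      | none => simp
      | some c =>
        simp only [Option.map_some, Option.getD_some]
        by_cases hjj : j.toNat = j'.toNat
        · simp [hjj]
          have : ¬ k.toNat = k'.toNat := by tauto
          rw [List.getElem?_set]
          simp [this]
        · simp [hjj]
    · simp [hii]

lemma pvShape_set3 (n k0 : Int) (dp : List (List (List Int))) (i j k v : Int)
    (h : pvShapeDp n k0 dp) : pvShapeDp n k0 (pvSet3 dp i j k v) := by
  obtain ⟨h1, h2, h3⟩ := h
  refine ⟨by simp [pvSet3, h1], ?_, ?_⟩
  · intro i'
    rw [← h2 i']
    simp only [pvSet3, List.getD_eq_getElem?_getD, List.getElem?_modify]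
    cases h1 : dp[i']? with
    | none => simp
    | some r => by_cases hii : i.toNat = i' <;> simp [hii]
  · intro i' j'
    rw [← h3 i' j']
    simp only [pvSet3, List.getD_eq_getElem?_getD, List.getElem?_modify]
    cases h1 : dp[i']? with
    | none => simp
    | some r =>
      by_cases hii : i.toNat = i' <;> simp [hii]
      rw [List.getElem?_modify]
      cases h2 : r[j']? with
      | none => simp
      | some c => by_cases hjj : j.toNat = j' <;> simp [hjj]

lemma pvCountPaths_eq (n k0 : Int) (arr : List (List Int)) (hco : pvCoins n arr) :
    ∀ (i j k : Int) (dp : List (List (List Int))), 0 ≤ i → 0 ≤ j → k ≤ k0 →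
      pvShapeDp n k0 dp → pvInvDp n k0 arr dp →
      (pvCountPaths n arr i j k dp).1 = pvCnt n arr i j k ∧
      pvShapeDp n k0 (pvCountPaths n arr i j k dp).2 ∧
      pvInvDp n k0 arr (pvCountPaths n arr i j k dp).2 := by
  intro i j k dp
  fun_induction pvCountPaths n arr i j k dp with
  | case1 i j k dp hcorner =>
    intro hi hj hk hsh hinv
    refine ⟨?_, hsh, hinv⟩
    rw [pvCnt, if_pos hcorner]
  | case2 i j k dp hcorner hoob =>
    intro hi hj hk hsh hinv
    refine ⟨?_, hsh, hinv⟩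
    rw [pvCnt, if_neg hcorner, dif_pos hoob]
  | case3 i j k dp hcorner hoob hmemo =>
    intro hi hj hk hsh hinv
    refine ⟨?_, hsh, hinv⟩
    rcases hinv i j k hi (by omega) hj (by omega) (by omega) hk with h | h
    · exact absurd h hmemo
    · simpa using h
  | case4 i j k dp hcorner hoob hmemo r1 r2 ih1 ih2 =>
    intro hi hj hk hsh hinv
    simp only [r1, r2] at *
    clear r1 r2
    have ha : 0 ≤ pvGetA arr i j := hco i j hi (by omega) hj (by omega)
    obtain ⟨e1, s1, v1⟩ := ih1 (by omega) hj (by omega) hsh hinv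
    obtain ⟨e2, s2, v2⟩ := ih2 hi (by omega) (by omega) s1 v1
    have hval : pvCnt n arr i j k =
        pvCnt n arr (i + 1) j (k - pvGetA arr i j) + pvCnt n arr i (j + 1) (k - pvGetA arr i j) := by
      rw [pvCnt, if_neg hcorner, dif_neg hoob]
    refine ⟨by simpa [e1, e2] using hval.symm, pvShape_set3 _ _ _ _ _ _ _ s2, ?_⟩
    intro i' j' k' hi' hin' hj' hjn' hk' hkk'
    by_cases heq : i' = i ∧ j' = j ∧ k' = k
    · obtain ⟨e1', e2', e3'⟩ := heq
      subst e1'; subst e2'; subst e3'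
      right
      obtain ⟨L1, L2, L3⟩ := s2
      rw [pvRead3_set3_self _ _ _ _ _ (by rw [L1]; omega)
        (by rw [L2]; split <;> omega) (by rw [L3]; split <;> omega), hval]
      simp [e1, e2]
    · rw [pvRead3_set3_ne _ _ _ _ _ _ _ _ (by omega)]
      exact v2 i' j' k' hi' hin' hj' hjn' hk' hkk'

-- ===== B side =====
lemma pvFoldl_insert_shift_getD (a t : Int) :
    ∀ (l : List (Int × Int)) (d : PySem.Dict Int Int), (l.map Prod.fst).Nodup →
      (l.foldl (fun d p => d.insert (p.1 + a) (d.getD (p.1 + a) 0 + p.2)) d).getD t 0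
        = d.getD t 0 + (PySem.Dict.mk l).getD (t - a) 0
  | [], d, _ => by
      simp [PySem.Dict.getD_eq_get?_getD]
      rfl
  | (s, c) :: tl, d, hnd => by
      simp only [List.map_cons, List.nodup_cons] at hnd
      rw [List.foldl_cons, pvFoldl_insert_shift_getD a t tl _ hnd.2]
      rw [PySem.Dict.getD_eq_get?_getD (PySem.Dict.mk ((s, c) :: tl)) (t - a) 0,
        PySem.Dict.get?_mk_cons]
      have hmk : ∀ x : Int, (PySem.Dict.mk tl).getD x 0 = ((PySem.Dict.mk tl).get? x).getD 0 :=
        fun x => PySem.Dict.getD_eq_get?_getD _ x 0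
      rw [PySem.Dict.getD_insert]
      by_cases hts : t = s + a
      · have hsa : (s == t - a) = true := by simp; omega
        have hnone : (PySem.Dict.mk tl).get? (t - a) = none :=
          (PySem.Dict.get?_eq_none_iff_not_mem_keys (PySem.Dict.mk tl) (t - a)).2 (by
            have : t - a = s := by omega
            rw [this]; simpa [PySem.Dict.keys] using hnd.1)
        simp only [if_pos hts, hsa, if_true, hmk, hnone]
        simp [hts]
      · have hsa : (s == t - a) = false := by simp; omega
        simp only [if_neg hts, hsa, hmk]
        simp

lemma pvAddShift_getD (a t : Int) (d src : PySem.Dict Int Int) (h : src.keys.Nodup) :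
    (pvAddShift a d src).getD t 0 = d.getD t 0 + src.getD (t - a) 0 := by
  obtain ⟨l⟩ := src
  exact pvFoldl_insert_shift_getD a t l d (by simpa [PySem.Dict.keys] using h)

lemma pvAddShift_nodup (a : Int) (d src : PySem.Dict Int Int) (h : d.keys.Nodup) :
    (pvAddShift a d src).keys.Nodup :=
  PySem.Dict.nodup_keys_foldl_insert_key src.items (fun p => p.1 + a) _ d h

-- the dict B builds for cell (i, j), expressed against an arbitrary row-below state
def pvHalf (n : Int) (arr : List (List Int)) (below : List (PySem.Dict Int Int)) (i j : Int) :
    PySem.Dict Int Int :=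
  if i + 1 < n then pvAddShift (pvGetA arr i j) PySem.Dict.empty (below.getD j.toNat PySem.Dict.empty)
  else PySem.Dict.empty

def pvDictAt (n : Int) (arr : List (List Int)) (below : List (PySem.Dict Int Int)) (i j : Int) :
    PySem.Dict Int Int :=
  if i = n - 1 ∧ j = n - 1 then PySem.Dict.empty.insert (pvGetA arr i j) 1
  else if h : j + 1 < n then
    pvAddShift (pvGetA arr i j) (pvHalf n arr below i j) (pvDictAt n arr below i (j + 1))
  else pvHalf n arr below i j
termination_by (n - j).toNat
decreasing_by omega

def pvRowDicts (n : Int) (arr : List (List Int)) (i : Int) : List (PySem.Dict Int Int) :=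
  if h : n ≤ i then []
  else (List.range n.toNat).map (fun (j : Nat) => pvDictAt n arr (pvRowDicts n arr (i + 1)) i ((j : Nat) : Int))
termination_by (n - i).toNat
decreasing_by omega

lemma pvHalf_nodup (n : Int) (arr : List (List Int)) (below : List (PySem.Dict Int Int))
    (i j : Int) : (pvHalf n arr below i j).keys.Nodup := by
  rw [pvHalf]
  split
  · exact pvAddShift_nodup _ _ _ PySem.Dict.nodup_keys_empty
  · exact PySem.Dict.nodup_keys_empty

lemma pvDictAt_nodup (n : Int) (arr : List (List Int)) (below : List (PySem.Dict Int Int))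
    (i j : Int) : (pvDictAt n arr below i j).keys.Nodup := by
  rw [pvDictAt]
  split
  · exact PySem.Dict.nodup_keys_insert _ _ _ PySem.Dict.nodup_keys_empty
  · split
    · exact pvAddShift_nodup _ _ _ (pvHalf_nodup n arr below i j)
    · exact pvHalf_nodup n arr below i j

lemma pvDictAt_spec (n : Int) (arr : List (List Int)) (hco : pvCoins n arr) :
    ∀ i j : Int, 0 ≤ i → i < n → 0 ≤ j → j < n →
      ∀ t : Int, (pvDictAt n arr (pvRowDicts n arr (i + 1)) i j).getD t 0 = pvCnt n arr i j t := by
  suffices H : ∀ N : Nat, ∀ i j : Int, 0 ≤ i → i < n → 0 ≤ j → j < n → (2 * n - i - j).toNat ≤ N →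
      ∀ t : Int, (pvDictAt n arr (pvRowDicts n arr (i + 1)) i j).getD t 0 = pvCnt n arr i j t by
    intro i j hi hin hj hjn
    exact H (2 * n - i - j).toNat i j hi hin hj hjn le_rfl
  intro N
  induction N with
  | zero => intro i j hi hin hj hjn hN; omega
  | succ N IH =>
    intro i j hi hin hj hjn hN t
    have hn1 : 1 ≤ n := by omega
    have hcc : 0 ≤ pvGetA arr (n - 1) (n - 1) := hco _ _ (by omega) (by omega) (by omega) (by omega)
    have ha : 0 ≤ pvGetA arr i j := hco i j hi hin hj hjn
    by_cases hcorner : i = n - 1 ∧ j = n - 1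
    · rw [pvDictAt, if_pos hcorner]
      obtain ⟨hc1, hc2⟩ := hcorner; subst hc1; subst hc2
      rw [pvCnt_corner n arr hn1 t, PySem.Dict.getD_insert]
      split <;> simp [PySem.Dict.getD_eq_get?_getD, PySem.Dict.get?_empty]
    · have hval1 : ∀ t' : Int,
          (pvHalf n arr (pvRowDicts n arr (i + 1)) i j).getD t' 0
            = if i + 1 < n then pvCnt n arr (i + 1) j (t' - pvGetA arr i j) else 0 := by
        intro t'
        rw [pvHalf]
        split
        · next hlt =>
          have hbelow : (pvRowDicts n arr (i + 1)).getD j.toNat PySem.Dict.empty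
              = pvDictAt n arr (pvRowDicts n arr (i + 1 + 1)) (i + 1) j := by
            rw [pvRowDicts, dif_neg (by omega)]
            rw [PySem.List.getD_map_range _ _ _ _ (by omega)]
            congr 1
            omega
          rw [hbelow, pvAddShift_getD _ _ _ _ (pvDictAt_nodup _ _ _ _ _)]
          rw [IH (i + 1) j (by omega) (by omega) hj hjn (by omega) (t' - pvGetA arr i j)]
          simp [PySem.Dict.getD_eq_get?_getD, PySem.Dict.get?_empty]
        · simp [PySem.Dict.getD_eq_get?_getD, PySem.Dict.get?_empty]
      have hfinal : (pvDictAt n arr (pvRowDicts n arr (i + 1)) i j).getD t 0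
          = (if i + 1 < n then pvCnt n arr (i + 1) j (t - pvGetA arr i j) else 0)
            + (if j + 1 < n then pvCnt n arr i (j + 1) (t - pvGetA arr i j) else 0) := by
        rw [pvDictAt, if_neg hcorner]
        split
        · next hjlt =>
          rw [pvAddShift_getD _ _ _ _ (pvDictAt_nodup _ _ _ _ _), hval1 t]
          rw [IH i (j + 1) hi hin (by omega) (by omega) (by omega) (t - pvGetA arr i j)]
        · next _hjlt =>
          rw [hval1 t]
          norm_num
      rw [hfinal]
      -- now compare with pvCnt
      by_cases ht0 : t < 0
      · rw [pvCnt_neg n arr hcc i j t ht0]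
        have hta : t - pvGetA arr i j < 0 := by omega
        rw [if_congr (Iff.rfl) (pvCnt_neg n arr hcc _ _ _ hta) rfl,
          if_congr (Iff.rfl) (pvCnt_neg n arr hcc _ _ _ hta) rfl]
        simp
      · rw [pvCnt_step n arr i j t hin hjn hcorner (by omega)]
        congr 1
        · split
          · rfl
          · next hlt => rw [pvCnt_oob n arr _ _ _ (by omega)]
        · split
          · rfl
          · next hlt => rw [pvCnt_oob n arr _ _ _ (by omega)]

lemma pvPyRange_desc_aux (a : Int) :
    PySem.List.pyRange a (-1) (-1)
      = List.map (fun (k : Nat) => a + -(k : Int)) (List.range (if -1 < a then (a + 1).toNat else 0)) := by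
  simp only [PySem.List.pyRange]
  norm_num

lemma pvPyRange_desc (a : Int) (h : 0 ≤ a) :
    PySem.List.pyRange a (-1) (-1) = a :: PySem.List.pyRange (a - 1) (-1) (-1) := by
  rw [pvPyRange_desc_aux, pvPyRange_desc_aux]
  rw [if_pos (by omega : (-1 : Int) < a)]
  have h2 : (a + 1).toNat = a.toNat + 1 := by omega
  rw [h2, List.range_succ_eq_map]
  simp only [List.map_cons, List.map_map, Nat.cast_zero, neg_zero, add_zero]
  congr 1
  by_cases h3 : (-1 : Int) < a - 1
  · rw [if_pos h3]
    have h4 : (a - 1 + 1).toNat = a.toNat := by omega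
    rw [h4]
    exact List.map_congr_left (fun k _ => by simp [Nat.succ_eq_add_one]; omega)
  · have ha0 : a = 0 := by omega
    subst ha0
    simp

lemma pvCell_eq_dictAt (n : Int) (arr : List (List Int)) (below row : List (PySem.Dict Int Int))
    (i j : Int)
    (hr : j + 1 < n → row.getD 0 PySem.Dict.empty = pvDictAt n arr below i (j + 1)) :
    pvCell n arr below row i j = pvDictAt n arr below i j := by
  rw [pvCell, pvDictAt]
  simp only [pvHalf, pvGetA]
  split
  · rfl
  · split
    · next hjlt => rw [hr hjlt]
    · rfl

lemma pvPyRange_neg_one : PySem.List.pyRange (-1) (-1) (-1) = [] := by decide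

lemma pvInnerFold (n : Int) (arr : List (List Int)) (below : List (PySem.Dict Int Int)) (i : Int) :
    ∀ m : Nat, (m : Int) < n →
      (PySem.List.pyRange (m : Int) (-1) (-1)).foldl
          (fun row j => pvCell n arr below row i j :: row)
          ((PySem.List.pyRange ((m : Int) + 1) n 1).map (pvDictAt n arr below i))
        = (PySem.List.pyRange 0 n 1).map (pvDictAt n arr below i) := by
  have hstep : ∀ j : Int, 0 ≤ j → j < n →
      pvCell n arr below ((PySem.List.pyRange (j + 1) n 1).map (pvDictAt n arr below i)) i j
          :: (PySem.List.pyRange (j + 1) n 1).map (pvDictAt n arr below i)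
        = (PySem.List.pyRange j n 1).map (pvDictAt n arr below i) := by
    intro j hj hjn
    rw [pvCell_eq_dictAt n arr below _ i j ?_]
    · rw [PySem.List.pyRange_one_cons (by omega : j < n)]
      simp
    · intro hlt
      rw [PySem.List.pyRange_one_cons (by omega : j + 1 < n)]
      simp
  intro m
  induction m with
  | zero =>
    intro hm
    norm_num at hm ⊢
    rw [pvPyRange_desc 0 le_rfl, show (0:Int) - 1 = -1 by norm_num, pvPyRange_neg_one,
      List.foldl_cons, List.foldl_nil]
    have := hstep 0 le_rfl hm
    norm_num at this
    rw [this]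
  | succ m IH =>
    intro hm
    push_cast at hm ⊢
    rw [pvPyRange_desc ((m : Int) + 1) (by omega), List.foldl_cons]
    have hc : ((m : Int) + 1 - 1) = (m : Int) := by omega
    rw [hstep ((m : Int) + 1) (by omega) (by omega), hc]
    exact IH (by omega)

lemma pvRowDicts_eq (n : Int) (arr : List (List Int)) (i : Int) (hi : 0 ≤ i) (hin : i < n) :
    pvRowDicts n arr i = (PySem.List.pyRange 0 n 1).map (pvDictAt n arr (pvRowDicts n arr (i + 1)) i) := by
  rw [pvRowDicts, dif_neg (by omega)]
  have hpr : PySem.List.pyRange 0 n 1 = (List.range n.toNat).map (fun (k : Nat) => (k : Int)) := by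
    conv_lhs => rw [show n = (n.toNat : Int) by omega]
    exact PySem.List.pyRange_zero_natCast n.toNat
  rw [hpr, List.map_map]
  rfl

lemma pvOuterFold (n : Int) (arr : List (List Int)) :
    ∀ m : Nat, (m : Int) < n →
      (PySem.List.pyRange (m : Int) (-1) (-1)).foldl
          (fun below i => (PySem.List.pyRange (n - 1) (-1) (-1)).foldl
            (fun row j => pvCell n arr below row i j :: row) [])
          (pvRowDicts n arr ((m : Int) + 1))
        = pvRowDicts n arr 0 := by
  have hF : ∀ i : Int, 0 ≤ i → i < n →
      (PySem.List.pyRange (n - 1) (-1) (-1)).foldl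
          (fun row j => pvCell n arr (pvRowDicts n arr (i + 1)) row i j :: row) []
        = pvRowDicts n arr i := by
    intro i hi hin
    have hn1 : 1 ≤ n := by omega
    have hcast : ((n - 1).toNat : Int) = n - 1 := by omega
    have hemp : (PySem.List.pyRange (((n - 1).toNat : Int) + 1) n 1).map (pvDictAt n arr (pvRowDicts n arr (i + 1)) i) = [] := by
      rw [hcast]
      have h2 : n - 1 + 1 = n := by omega
      rw [h2, PySem.List.pyRange_one]
      simp
    rw [← hcast, ← hemp, pvInnerFold n arr (pvRowDicts n arr (i + 1)) i (n - 1).toNat (by omega)]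
    rw [← pvRowDicts_eq n arr i hi hin]
  intro m
  induction m with
  | zero =>
    intro hm
    norm_num at hm ⊢
    rw [pvPyRange_desc 0 le_rfl, show (0:Int) - 1 = -1 by norm_num, pvPyRange_neg_one,
      List.foldl_cons, List.foldl_nil]
    have := hF 0 le_rfl hm
    norm_num at this
    rw [this]
  | succ m IH =>
    intro hm
    push_cast at hm ⊢
    rw [pvPyRange_desc ((m : Int) + 1) (by omega), List.foldl_cons]
    have hc : ((m : Int) + 1 - 1) = (m : Int) := by omega
    rw [hc, hF ((m : Int) + 1) (by omega) (by omega)]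
    exact IH (by omega)

-- ===== initial state facts and assembly =====
lemma pvShape_init (n k : Int) :
    pvShapeDp n k (List.replicate n.toNat (List.replicate n.toNat (List.replicate (k + 1).toNat (-1 : Int)))) := by
  have eg : ∀ {α : Type} (m : Nat) (x : α) (i : Nat) (d : α),
      (List.replicate m x).getD i d = if i < m then x else d := by
    intro α m x i d
    rw [List.getD_eq_getElem?_getD, List.getElem?_replicate]
    split <;> simp
  refine ⟨by simp, ?_, ?_⟩
  · intro i'
    rw [eg]
    split <;> simp
  · intro i' j'
    rw [eg]
    split
    · next h =>
      rw [eg]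
      split <;> simp_all
    · simp_all

lemma pvInv_init (n k : Int) (arr : List (List Int)) :
    pvInvDp n k arr (List.replicate n.toNat (List.replicate n.toNat (List.replicate (k + 1).toNat (-1 : Int)))) := by
  intro i j k' hi hin hj hjn hk hkk
  left
  rw [pvRead3, List.getD_replicate _ (by omega), List.getD_replicate _ (by omega),
    List.getD_replicate _ (by omega)]

-- ===== VERDICT (by name: the statement is the Claim_ definition above) =====
theorem numberOfPath_spec : Claim_equal_numberOfPath := by
  intro n k arr _hdom hpre
  rcases hpre with hn0 | ⟨hn, hk, hne⟩ | ⟨hn, hlen, hrows⟩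
  · -- n ≤ 0: A short-circuits out of bounds at (0, 0), B's guard returns 0
    unfold Spec_numberOfPath numberOfPath numberOfPath_alt
    rw [if_pos (Or.inl hn0)]
    simp only []
    rw [pvCountPaths.eq_def, if_neg (by rintro ⟨h1, _, _⟩; omega), dif_pos (by omega)]
  · -- k < 0 and n ≠ 1: A's negative-sum cutoff fires at (0, 0), B's guard returns 0
    unfold Spec_numberOfPath numberOfPath numberOfPath_alt
    rw [if_pos (Or.inr hk)]
    simp only []
    rw [pvCountPaths.eq_def, if_neg (by rintro ⟨h1, _, _⟩; omega), dif_pos (by omega)]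
  have hco : pvCoins n arr := by
    intro i j hi hin hj hjn
    have := (hrows i.toNat (by omega)).2 j.toNat (by omega)
    simpa [pvGetA] using this
  unfold Spec_numberOfPath numberOfPath
  simp only []
  rw [(pvCountPaths_eq n k arr hco 0 0 k _ le_rfl le_rfl le_rfl (pvShape_init n k) (pvInv_init n k arr)).1]
  unfold numberOfPath_alt
  by_cases hg : n ≤ 0 ∨ k < 0
  · rw [if_pos hg]
    rcases hg with hg | hg
    · rw [pvCnt, if_neg (by rintro ⟨h1, _, _⟩; omega), dif_pos (by omega)]
    · exact pvCnt_neg n arr (hco _ _ (by omega) (by omega) (by omega) (by omega)) 0 0 k hg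
  · rw [if_neg hg]
    simp only []
    have hcast : ((n - 1).toNat : Int) = n - 1 := by omega
    have hstart : pvRowDicts n arr (((n - 1).toNat : Int) + 1) = [] := by
      rw [pvRowDicts, dif_pos (by omega)]
    have hout := pvOuterFold n arr (n - 1).toNat (by omega)
    rw [hstart] at hout
    rw [hcast] at hout
    rw [hout]
    rw [pvRowDicts_eq n arr 0 le_rfl (by omega)]
    rw [PySem.List.pyRange_one_cons (by omega : (0:Int) < n)]
    simp only [List.map_cons, List.getD_cons_zero]
    exact (pvDictAt_spec n arr hco 0 0 le_rfl (by omega) le_rfl (by omega) k).symm
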